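-- pv_equiv track=rewrite | github.com/projectstardust25/project-stardust | split_convo.py | derive_title
-- ===== SOURCE A (Python) =====
-- def derive_title(slice_msgs):
--     for m in slice_msgs:
--         if (m.get("role") == "user") and (m.get("content") or "").strip():
--             return (m["content"].strip().split("\n")[0])[:80]
--     for m in slice_msgs:
--         if (m.get("role") == "assistant") and (m.get("content") or "").strip():
--             return (m["content"].strip().split("\n")[0])[:80]
--     return "Slice"
-- ===== SOURCE B (Python) =====
-- def _fmt(content):
--     return (content.strip().split("\n")[0])[:80]
--
-- def derive_title(slice_msgs):
--     assistant_title = None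
--     for m in slice_msgs:
--         role = m.get("role")
--         stripped = (m.get("content") or "").strip()
--         if role == "user" and stripped:
--             return _fmt(m["content"])
--         if role == "assistant" and stripped and assistant_title is None:
--             assistant_title = _fmt(m["content"])
--     return assistant_title if assistant_title is not None else "Slice"
-- ===== Notes on version B (the rewrite author's own statement) =====
-- stated objective: simpler
-- what changed: One single pass tracking the first assistant title instead of two full scans of the list, with user messages winning immediately.
import Mathlib
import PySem

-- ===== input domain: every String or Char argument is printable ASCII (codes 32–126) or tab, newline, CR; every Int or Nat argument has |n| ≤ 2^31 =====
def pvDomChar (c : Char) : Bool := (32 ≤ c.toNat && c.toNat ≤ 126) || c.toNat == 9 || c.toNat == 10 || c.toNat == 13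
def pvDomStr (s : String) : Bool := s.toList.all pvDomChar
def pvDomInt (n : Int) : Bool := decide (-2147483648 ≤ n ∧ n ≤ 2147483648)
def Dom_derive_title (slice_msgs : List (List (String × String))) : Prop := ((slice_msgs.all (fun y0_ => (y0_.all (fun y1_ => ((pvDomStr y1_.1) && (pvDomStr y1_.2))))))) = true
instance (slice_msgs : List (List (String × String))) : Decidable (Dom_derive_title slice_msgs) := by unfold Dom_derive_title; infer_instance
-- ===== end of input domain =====

-- B replaces A's two full scans by one pass that records the first assistant title; same return value, proved equal.


-- ===== PORT A =====
-- m.get(k) on an association-list dict: first matching key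
def pvGet (m : List (String × String)) (k : String) : Option String :=
  (m.find? (fun p => p.1 == k)).map (·.2)

-- (content.strip().split("\n")[0])[:80]; split("\n") is never empty, so [0] is the head
def pvFmt (c : String) : String :=
  PySem.Str.slice (((PySem.Str.split? (PySem.Str.strip c) "\n").getD []).headD "") none (some 80)

-- first loop of A: return on the first user message with non-blank content
def pvScanUser : List (List (String × String)) → Option String
  | [] => none
  | m :: rest =>
    if pvGet m "role" = some "user" ∧ PySem.Str.strip ((pvGet m "content").getD "") ≠ "" then
      some (pvFmt ((pvGet m "content").getD ""))
    else pvScanUser rest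

-- second loop of A: same for assistant messages
def pvScanAssistant : List (List (String × String)) → Option String
  | [] => none
  | m :: rest =>
    if pvGet m "role" = some "assistant" ∧ PySem.Str.strip ((pvGet m "content").getD "") ≠ "" then
      some (pvFmt ((pvGet m "content").getD ""))
    else pvScanAssistant rest

def derive_title (slice_msgs : List (List (String × String))) : String :=
  match pvScanUser slice_msgs with
  | some t => t
  | none =>
    match pvScanAssistant slice_msgs with
    | some t => t
    | none => "Slice"

-- ===== PORT B =====
-- single pass; acc holds the first assistant title seen so far (None until one is found)
def pvGo : List (List (String × String)) → Option String → String
  | [], acc => acc.getD "Slice"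
  | m :: rest, acc =>
    let role := pvGet m "role"
    let stripped := PySem.Str.strip ((pvGet m "content").getD "")
    if role = some "user" ∧ stripped ≠ "" then
      pvFmt ((pvGet m "content").getD "")
    else if role = some "assistant" ∧ stripped ≠ "" ∧ acc = none then
      pvGo rest (some (pvFmt ((pvGet m "content").getD "")))
    else
      pvGo rest acc

def derive_title_alt (slice_msgs : List (List (String × String))) : String :=
  pvGo slice_msgs none

-- ===== PRECONDITION & SPEC =====
def Spec_derive_title (slice_msgs : List (List (String × String))) (out : String) : Prop := out = derive_title_alt slice_msgs
instance (slice_msgs : List (List (String × String))) (out : String) : Decidable (Spec_derive_title slice_msgs out) := by unfold Spec_derive_title; infer_instance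

-- ===== CLAIM (what is proved, stated in full; the proofs are below) =====
def Claim_equal_derive_title : Prop := ∀ (slice_msgs : List (List (String × String))), Dom_derive_title slice_msgs → Spec_derive_title slice_msgs (derive_title slice_msgs)

-- ===== LEMMAS AND PROOFS =====
-- the one-pass loop equals: first user title if any, else acc (if set), else first assistant title, else "Slice"
lemma pvGo_eq (msgs : List (List (String × String))) (acc : Option String) :
    pvGo msgs acc =
      match pvScanUser msgs with
      | some t => t
      | none => (acc.or (pvScanAssistant msgs)).getD "Slice" := by
  induction msgs generalizing acc with
  | nil => cases acc <;> simp [pvGo, pvScanUser, pvScanAssistant]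
  | cons m rest ih =>
    by_cases hU : pvGet m "role" = some "user" ∧ PySem.Str.strip ((pvGet m "content").getD "") ≠ ""
    · simp [pvGo, pvScanUser, hU]
    · by_cases hA : pvGet m "role" = some "assistant" ∧ PySem.Str.strip ((pvGet m "content").getD "") ≠ ""
      · cases acc with
        | none =>
          simp [pvGo, pvScanUser, pvScanAssistant, hA, ih]
        | some a =>
          simp [pvGo, pvScanUser, pvScanAssistant, hA, ih]
      · have hA' : ¬ (pvGet m "role" = some "assistant" ∧
            PySem.Str.strip ((pvGet m "content").getD "") ≠ "" ∧ acc = none) := by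
          intro h; exact hA ⟨h.1, h.2.1⟩
        simp [pvGo, pvScanUser, pvScanAssistant, hU, hA, hA', ih]

-- ===== VERDICT (by name: the statement is the Claim_ definition above) =====
theorem derive_title_spec : Claim_equal_derive_title := by
  intro s _
  show derive_title s = derive_title_alt s
  rw [derive_title_alt, pvGo_eq, derive_title]
  cases pvScanUser s <;> cases pvScanAssistant s <;> simp
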